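-- pv_equiv track=rewrite | github.com/texelioab/streamlit-labelling | src/gpt_augmentation.py | write_topic_information
-- ===== SOURCE A (Python) =====
-- def write_topic_information(topic_name, topic_definition, keywords, name_variations, difficult_cases, labelled_sentences):
--     topic_information = f'You are tasked with labelling the following topic:\n\n{topic_name}\n{topic_definition}'
--
--     topic_information += '\n\nHere are some keywords that are often associated with the topic. Note, the mere presence of a keyword in a sentence does not guarantee the presence of the topic.'
--     for keyword in keywords:
--         topic_information += f'\n{keyword}'
--
--     topic_information += '\n\nHere are some name variations for the topic: other ways in which it is commonly referred to.'
--     for name_variation in name_variations: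
--         topic_information += f'\n{name_variation}'
--
--     topic_information += '\n\nHere are some descriptions of difficult cases for the topic. These are cases which, for whatever reason, might confuse the labeller and lead them to place an incorrect or inaccurate label.'
--     for difficult_case in difficult_cases:
--         topic_information += f'\n{difficult_case}'
--
--     topic_information += '\n\nHere are some sample sentences, with labels attached and an explanation for the "Yes", "Maybe", or "No" label.'
--     for labelled_sentence in labelled_sentences:
--         topic_information += f'\n{labelled_sentence}'
--     return topic_information
-- ===== SOURCE B (Python) =====
-- KW_HEADER = 'Here are some keywords that are often associated with the topic. Note, the mere presence of a keyword in a sentence does not guarantee the presence of the topic.'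
-- NV_HEADER = 'Here are some name variations for the topic: other ways in which it is commonly referred to.'
-- DC_HEADER = 'Here are some descriptions of difficult cases for the topic. These are cases which, for whatever reason, might confuse the labeller and lead them to place an incorrect or inaccurate label.'
-- LS_HEADER = 'Here are some sample sentences, with labels attached and an explanation for the "Yes", "Maybe", or "No" label.'
--
--
-- def write_topic_information(topic_name, topic_definition, keywords, name_variations, difficult_cases, labelled_sentences):
--     seed = f'You are tasked with labelling the following topic:\n\n{topic_name}\n{topic_definition}'
--     sections = [(KW_HEADER, keywords), (NV_HEADER, name_variations),
--                 (DC_HEADER, difficult_cases), (LS_HEADER, labelled_sentences)]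
--     blocks = ['\n'.join([header] + [f'{item}' for item in items])
--               for header, items in sections]
--     return '\n\n'.join([seed] + blocks)
-- ===== Notes on version B (the rewrite author's own statement) =====
-- stated objective: simpler
-- what changed: Replaced A's four copy-pasted header-constant-then-append-loop passes over a growing string by a data-driven list of (header, items) sections, each joined with '\n' and all blocks joined with '\n\n'.
import Mathlib
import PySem

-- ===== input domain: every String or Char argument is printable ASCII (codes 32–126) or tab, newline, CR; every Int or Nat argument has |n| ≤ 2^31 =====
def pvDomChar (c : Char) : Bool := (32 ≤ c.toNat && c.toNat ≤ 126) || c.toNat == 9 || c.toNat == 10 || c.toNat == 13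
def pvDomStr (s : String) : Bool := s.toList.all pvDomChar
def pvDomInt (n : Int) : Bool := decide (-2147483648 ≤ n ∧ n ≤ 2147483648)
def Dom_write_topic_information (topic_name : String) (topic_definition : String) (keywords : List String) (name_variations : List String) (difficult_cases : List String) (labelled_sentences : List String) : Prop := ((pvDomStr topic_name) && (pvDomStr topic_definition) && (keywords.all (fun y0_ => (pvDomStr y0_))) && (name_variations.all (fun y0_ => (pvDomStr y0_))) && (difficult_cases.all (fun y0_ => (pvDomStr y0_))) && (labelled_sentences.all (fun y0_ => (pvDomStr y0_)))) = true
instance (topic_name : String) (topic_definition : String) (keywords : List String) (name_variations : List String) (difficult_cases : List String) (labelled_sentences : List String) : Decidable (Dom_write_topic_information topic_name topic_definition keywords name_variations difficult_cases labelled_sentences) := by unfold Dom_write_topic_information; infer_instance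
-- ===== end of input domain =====

-- B replaces A's four copy-pasted header-then-append-loop passes by one data-driven
-- build of four (header, items) blocks joined with '\n' and then '\n\n' (objective: simpler).

-- ===== PORT A =====
-- A appends each header (with its leading '\n\n') then folds each list, appending '\n' + item.
def write_topic_information (topic_name : String) (topic_definition : String) (keywords : List String) (name_variations : List String) (difficult_cases : List String) (labelled_sentences : List String) : String :=
  let t := "You are tasked with labelling the following topic:\n\n" ++ topic_name ++ "\n" ++ topic_definition
  let t := t ++ "\n\nHere are some keywords that are often associated with the topic. Note, the mere presence of a keyword in a sentence does not guarantee the presence of the topic."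
  let t := keywords.foldl (fun acc keyword => acc ++ "\n" ++ keyword) t
  let t := t ++ "\n\nHere are some name variations for the topic: other ways in which it is commonly referred to."
  let t := name_variations.foldl (fun acc name_variation => acc ++ "\n" ++ name_variation) t
  let t := t ++ "\n\nHere are some descriptions of difficult cases for the topic. These are cases which, for whatever reason, might confuse the labeller and lead them to place an incorrect or inaccurate label."
  let t := difficult_cases.foldl (fun acc difficult_case => acc ++ "\n" ++ difficult_case) t
  let t := t ++ "\n\nHere are some sample sentences, with labels attached and an explanation for the \"Yes\", \"Maybe\", or \"No\" label."
  let t := labelled_sentences.foldl (fun acc labelled_sentence => acc ++ "\n" ++ labelled_sentence) t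
  t

-- ===== PORT B =====
def pvKW_HEADER : String := "Here are some keywords that are often associated with the topic. Note, the mere presence of a keyword in a sentence does not guarantee the presence of the topic."
def pvNV_HEADER : String := "Here are some name variations for the topic: other ways in which it is commonly referred to."
def pvDC_HEADER : String := "Here are some descriptions of difficult cases for the topic. These are cases which, for whatever reason, might confuse the labeller and lead them to place an incorrect or inaccurate label."
def pvLS_HEADER : String := "Here are some sample sentences, with labels attached and an explanation for the \"Yes\", \"Maybe\", or \"No\" label."

-- B: seed, then four (header, items) sections, each joined with '\n', all joined with '\n\n'.
def write_topic_information_alt (topic_name : String) (topic_definition : String) (keywords : List String) (name_variations : List String) (difficult_cases : List String) (labelled_sentences : List String) : String :=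
  let seed := "You are tasked with labelling the following topic:\n\n" ++ topic_name ++ "\n" ++ topic_definition
  let sections : List (String × List String) :=
    [(pvKW_HEADER, keywords), (pvNV_HEADER, name_variations),
     (pvDC_HEADER, difficult_cases), (pvLS_HEADER, labelled_sentences)]
  let blocks := sections.map (fun sec => PySem.Str.join "\n" (sec.1 :: sec.2))
  PySem.Str.join "\n\n" ([seed] ++ blocks)

-- ===== PRECONDITION & SPEC =====
def Spec_write_topic_information (topic_name : String) (topic_definition : String) (keywords : List String) (name_variations : List String) (difficult_cases : List String) (labelled_sentences : List String) (out : String) : Prop := out = write_topic_information_alt topic_name topic_definition keywords name_variations difficult_cases labelled_sentences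
instance (topic_name : String) (topic_definition : String) (keywords : List String) (name_variations : List String) (difficult_cases : List String) (labelled_sentences : List String) (out : String) : Decidable (Spec_write_topic_information topic_name topic_definition keywords name_variations difficult_cases labelled_sentences out) := by unfold Spec_write_topic_information; infer_instance

-- ===== CLAIM (what is proved, stated in full; the proofs are below) =====
def Claim_equal_write_topic_information : Prop := ∀ (topic_name : String) (topic_definition : String) (keywords : List String) (name_variations : List String) (difficult_cases : List String) (labelled_sentences : List String), Dom_write_topic_information topic_name topic_definition keywords name_variations difficult_cases labelled_sentences → Spec_write_topic_information topic_name topic_definition keywords name_variations difficult_cases labelled_sentences (write_topic_information topic_name topic_definition keywords name_variations difficult_cases labelled_sentences)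

-- ===== LEMMAS AND PROOFS =====
theorem pyjoin_cons_cons (sep a b : String) (l : List String) :
    PySem.Str.join sep (a :: b :: l) = a ++ sep ++ PySem.Str.join sep (b :: l) := by
  simp [PySem.Str.join, PySem.Chars.join_cons_cons, String.append_assoc]

theorem pyjoin_singleton (sep a : String) : PySem.Str.join sep [a] = a := by
  simp [PySem.Str.join, PySem.Chars.join_singleton]

theorem pyjoin_prefix (sep t u : String) (l : List String) :
    PySem.Str.join sep ((t ++ u) :: l) = t ++ PySem.Str.join sep (u :: l) := by
  cases l with
  | nil => simp [pyjoin_singleton]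
  | cons c cs => simp [pyjoin_cons_cons, String.append_assoc]

theorem foldl_newline (items : List String) (h : String) :
    items.foldl (fun acc x => acc ++ "\n" ++ x) h = PySem.Str.join "\n" (h :: items) := by
  induction items generalizing h with
  | nil => simp [pyjoin_singleton]
  | cons x xs ih =>
    rw [List.foldl_cons, ih, pyjoin_prefix "\n" (h ++ "\n") x xs, pyjoin_cons_cons]

set_option maxRecDepth 20000 in
theorem write_topic_information_spec : Claim_equal_write_topic_information := by
  intro topic_name topic_definition keywords name_variations difficult_cases labelled_sentences _
  show _ = _
  simp only [write_topic_information, write_topic_information_alt, List.map, List.singleton_append,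
    foldl_newline, pyjoin_cons_cons]
  have hKW : ("\n\nHere are some keywords that are often associated with the topic. Note, the mere presence of a keyword in a sentence does not guarantee the presence of the topic." : String) = "\n\n" ++ pvKW_HEADER := rfl
  have hNV : ("\n\nHere are some name variations for the topic: other ways in which it is commonly referred to." : String) = "\n\n" ++ pvNV_HEADER := rfl
  have hDC : ("\n\nHere are some descriptions of difficult cases for the topic. These are cases which, for whatever reason, might confuse the labeller and lead them to place an incorrect or inaccurate label." : String) = "\n\n" ++ pvDC_HEADER := rfl
  have hLS : ("\n\nHere are some sample sentences, with labels attached and an explanation for the \"Yes\", \"Maybe\", or \"No\" label." : String) = "\n\n" ++ pvLS_HEADER := rfl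
  rw [hKW, hNV, hDC, hLS]
  simp only [← String.append_assoc, pyjoin_prefix, pyjoin_singleton]
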